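-- pv_equiv track=rewrite | github.com/botcs/detectron2 | detectron2/evaluation/custom_evaluation/matcher.py | already_matched
-- ===== SOURCE A (Python) =====
-- def already_matched(gt_instances, pred_instances):
--     # Sanity check for cases when matching is invoked multiple times
--     any_matched = any(
--         "matched_preds" in gt_inst for gt_inst in gt_instances
--     ) or any(
--         "matched_gts" in pred_inst for pred_inst in pred_instances
--     )
--
--     all_matched = all(
--         "matched_preds" in gt_inst for gt_inst in gt_instances
--     ) and all(
--         "matched_gts" in pred_inst for pred_inst in pred_instances
--     )
--     assert any_matched == all_matched
--     return all_matched
-- ===== SOURCE B (Python) =====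
-- def already_matched(gt_instances, pred_instances):
--     # State-machine pass: remember the first match-flag seen, assert every later
--     # instance agrees with it, and return that flag directly (no any/all aggregates).
--     state = None
--     for flag in [("matched_preds" in g) for g in gt_instances] + [
--         ("matched_gts" in p) for p in pred_instances
--     ]:
--         if state is None:
--             state = flag
--         else:
--             assert state == flag
--     assert state is not None
--     return state
-- ===== Notes on version B (the rewrite author's own statement) =====
-- stated objective: alternative
-- what changed: Replaces A's four any/all aggregate scans and aggregate assert with a state-machine fold: take the first instance's match-flag as the state, assert element-wise that every later instance agrees, and return the state itself.
import Mathlib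
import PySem

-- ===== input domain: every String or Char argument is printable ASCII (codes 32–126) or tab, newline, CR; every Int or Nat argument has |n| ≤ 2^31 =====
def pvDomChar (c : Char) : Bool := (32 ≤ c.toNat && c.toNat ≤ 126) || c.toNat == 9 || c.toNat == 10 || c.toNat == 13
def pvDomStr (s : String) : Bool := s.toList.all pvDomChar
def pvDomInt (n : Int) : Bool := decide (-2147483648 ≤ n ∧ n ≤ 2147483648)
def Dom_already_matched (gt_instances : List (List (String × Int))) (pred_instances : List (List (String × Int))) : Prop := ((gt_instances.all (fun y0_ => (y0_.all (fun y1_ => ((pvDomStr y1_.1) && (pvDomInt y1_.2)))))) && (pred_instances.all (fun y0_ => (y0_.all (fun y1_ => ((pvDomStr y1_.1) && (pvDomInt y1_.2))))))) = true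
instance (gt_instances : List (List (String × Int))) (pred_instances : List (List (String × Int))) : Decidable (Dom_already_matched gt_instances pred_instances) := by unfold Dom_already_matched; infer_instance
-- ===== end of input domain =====

-- B replaces A's any/all aggregate scans with a state-machine fold (first flag as state,
-- element-wise uniformity assert, return the state): alternative decomposition, same O(n) cost.


-- ===== PORT A =====
-- `"matched_preds" in gt_inst` on a dict = key membership in the association list
def hasMatchedPreds (g : List (String × Int)) : Bool := g.any (fun kv => kv.1 == "matched_preds")
def hasMatchedGts (p : List (String × Int)) : Bool := p.any (fun kv => kv.1 == "matched_gts")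

def already_matched (gt_instances : List (List (String × Int))) (pred_instances : List (List (String × Int))) : Bool :=
  let _any_matched := gt_instances.any hasMatchedPreds || pred_instances.any hasMatchedGts
  let all_matched := gt_instances.all hasMatchedPreds && pred_instances.all hasMatchedGts
  -- `assert any_matched == all_matched` raises exactly outside Pre_already_matched
  all_matched

-- ===== PORT B =====
-- fold step of Source B's loop: keep the first flag seen (the element-wise
-- `assert state == flag` raises exactly outside Pre_already_matched)
def amStep (state : Option Bool) (flag : Bool) : Option Bool :=
  match state with
  | none => some flag
  | some s => some s

def already_matched_alt (gt_instances : List (List (String × Int))) (pred_instances : List (List (String × Int))) : Bool :=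
  let flags := gt_instances.map hasMatchedPreds ++ pred_instances.map hasMatchedGts
  let state := flags.foldl amStep none
  -- `assert state is not None`: the empty input raises, outside Pre_already_matched
  state.getD false

-- ===== PRECONDITION & SPEC =====
-- Pre_ excludes exactly the inputs on which A's `assert any_matched == all_matched` raises
-- AssertionError (partially-matched input, or both lists empty); B's own asserts raise on
-- exactly the same inputs.
def Pre_already_matched (gt_instances : List (List (String × Int))) (pred_instances : List (List (String × Int))) : Prop :=
  (gt_instances ≠ [] ∨ pred_instances ≠ []) ∧
    ((∀ g ∈ gt_instances, hasMatchedPreds g) ∧ (∀ p ∈ pred_instances, hasMatchedGts p) ∨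
     (∀ g ∈ gt_instances, ¬ hasMatchedPreds g) ∧ (∀ p ∈ pred_instances, ¬ hasMatchedGts p))
instance (gt_instances : List (List (String × Int))) (pred_instances : List (List (String × Int))) : Decidable (Pre_already_matched gt_instances pred_instances) := by unfold Pre_already_matched; infer_instance

def pvWitness_already_matched : (List (List (String × Int))) × (List (List (String × Int))) :=
  ([[("matched_preds", 1)]], [[("matched_gts", 2)]])

def Spec_already_matched (gt_instances : List (List (String × Int))) (pred_instances : List (List (String × Int))) (out : Bool) : Prop := out = already_matched_alt gt_instances pred_instances
instance (gt_instances : List (List (String × Int))) (pred_instances : List (List (String × Int))) (out : Bool) : Decidable (Spec_already_matched gt_instances pred_instances out) := by unfold Spec_already_matched; infer_instance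

-- ===== CLAIM (what is proved, stated in full; the proofs are below) =====
def Claim_equal_already_matched : Prop := ∀ (gt_instances : List (List (String × Int))) (pred_instances : List (List (String × Int))), Dom_already_matched gt_instances pred_instances → Pre_already_matched gt_instances pred_instances → Spec_already_matched gt_instances pred_instances (already_matched gt_instances pred_instances)

-- ===== LEMMAS AND PROOFS =====
-- amStep keeps a `some` state unchanged, so the fold returns the FIRST flag.
theorem amStep_foldl_some (l : List Bool) (s : Bool) : l.foldl amStep (some s) = some s := by
  induction l with
  | nil => rfl
  | cons a t ih => simpa [amStep] using ih

theorem amStep_foldl_cons (f : Bool) (t : List Bool) :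
    (f :: t).foldl amStep none = some f := by
  simpa [amStep] using amStep_foldl_some t f

-- ===== VERDICT (by name: the statement is the Claim_ definition above) =====
theorem already_matched_spec : Claim_equal_already_matched := by
  intro gt pred _ hpre
  obtain ⟨hne, hcase⟩ := hpre
  simp only [Spec_already_matched, already_matched, already_matched_alt]
  -- flags is nonempty; its head decides B's output
  obtain ⟨f, t, hft⟩ : ∃ f t, gt.map hasMatchedPreds ++ pred.map hasMatchedGts = f :: t := by
    rcases hne with h | h
    · obtain ⟨g, gs, rfl⟩ := List.exists_cons_of_ne_nil h
      exact ⟨hasMatchedPreds g, _, rfl⟩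
    · obtain ⟨p, ps, rfl⟩ := List.exists_cons_of_ne_nil h
      cases gt with
      | nil => exact ⟨hasMatchedGts p, _, rfl⟩
      | cons g gs => exact ⟨hasMatchedPreds g, _, rfl⟩
  -- the head flag is in the list, so its value is fixed by the uniformity hypothesis
  have hfmem : f ∈ gt.map hasMatchedPreds ++ pred.map hasMatchedGts := by
    rw [hft]; exact List.mem_cons_self
  rw [hft, amStep_foldl_cons]
  rcases hcase with ⟨ha, hb⟩ | ⟨ha, hb⟩
  · have hf : f = true := by
      rcases List.mem_append.mp hfmem with h | h
      · obtain ⟨g, hg, rfl⟩ := List.mem_map.mp h; exact ha g hg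
      · obtain ⟨p, hp, rfl⟩ := List.mem_map.mp h; exact hb p hp
    simp [hf, List.all_eq_true]
    exact ⟨ha, hb⟩
  · have hf : f = false := by
      rcases List.mem_append.mp hfmem with h | h
      · obtain ⟨g, hg, rfl⟩ := List.mem_map.mp h; simpa using ha g hg
      · obtain ⟨p, hp, rfl⟩ := List.mem_map.mp h; simpa using hb p hp
    have hallf : (gt.all hasMatchedPreds && pred.all hasMatchedGts) = false := by
      rcases hne with h | h
      · obtain ⟨g, hg⟩ := List.exists_mem_of_ne_nil gt h
        simp only [Bool.and_eq_false_iff, List.all_eq_false]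
        exact Or.inl ⟨g, hg, by simpa using ha g hg⟩
      · obtain ⟨q, hq⟩ := List.exists_mem_of_ne_nil pred h
        simp only [Bool.and_eq_false_iff, List.all_eq_false]
        exact Or.inr ⟨q, hq, by simpa using hb q hq⟩
    simp [hf, hallf]
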